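-- pv_equiv track=rewrite | github.com/gcmgomes/mineira2022 | problems/gato/solutions/good/gg.py | Solve
-- ===== SOURCE A (Python) =====
-- def IsDiv(cur_num, k, p):
--     i = 0
--     while i < k:
--         if cur_num % p[i] == 0:
--             return True
--         i += 1
--     return False
--
-- def Solve(i, dp, recover, num, k, p):
--     if i >= len(num):
--         return 1
--     if dp[i] != -1:
--         return dp[i]
--     cur_num = 0
--     dp[i] = 0
--     j = i
--     while j < len(num) and dp[i] == 0:
--         cur_num = 10*cur_num + int(num[j])
--         if IsDiv(cur_num, k, p):
--             rest = Solve(j+1, dp, recover, num, k, p)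
--             recover[i] = j+1
--             dp[i] = rest
--         j += 1
--     return dp[i]
-- ===== SOURCE B (Python) =====
-- def Solve(i, dp, recover, num, k, p):
--     # Iterative back-to-front DP with incremental per-prime remainders
--     # (return value only; unlike A, this does not mutate dp/recover).
--     n = len(num)
--     if i >= n:
--         return 1
--     if dp[i] != -1:
--         return dp[i]
--     pk = p[:k]
--     t = [0] * (n + 1)
--     t[n] = 1
--     for m in range(n - 1, i - 1, -1):
--         if dp[m] != -1:
--             t[m] = dp[m]
--             continue
--         rems = [0] * len(pk)
--         val = 0
--         for j in range(m, n):
--             d = int(num[j])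
--             rems = [(10 * r + d) % q for r, q in zip(rems, pk)]
--             if any(r == 0 for r in rems):
--                 val = t[j + 1]
--                 if val != 0:
--                     break
--         t[m] = val
--     return t[i]
-- ===== Notes on version B (the rewrite author's own statement) =====
-- stated objective: alternative
-- what changed: Replaces the memoised top-down recursion that mutates dp/recover in place by a bottom-up table filled back-to-front, and replaces the divisibility tests on ever-growing big-integer segment values by incremental per-divisor remainders; B computes the same return value without mutating dp/recover.
-- outside the precondition, e.g. on Solve(-3, [-1, 0, -1], [0, 0, 0], '676', 1, [7]): A returns 1, B returns 0; on Solve(0, [-1], [0], '2', 2, [2]): A returns 1, B returns 1; on Solve(0, [-1], [0], '2', 2, [2, 0]): A returns 1, B raises ZeroDivisionError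
import Mathlib
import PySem

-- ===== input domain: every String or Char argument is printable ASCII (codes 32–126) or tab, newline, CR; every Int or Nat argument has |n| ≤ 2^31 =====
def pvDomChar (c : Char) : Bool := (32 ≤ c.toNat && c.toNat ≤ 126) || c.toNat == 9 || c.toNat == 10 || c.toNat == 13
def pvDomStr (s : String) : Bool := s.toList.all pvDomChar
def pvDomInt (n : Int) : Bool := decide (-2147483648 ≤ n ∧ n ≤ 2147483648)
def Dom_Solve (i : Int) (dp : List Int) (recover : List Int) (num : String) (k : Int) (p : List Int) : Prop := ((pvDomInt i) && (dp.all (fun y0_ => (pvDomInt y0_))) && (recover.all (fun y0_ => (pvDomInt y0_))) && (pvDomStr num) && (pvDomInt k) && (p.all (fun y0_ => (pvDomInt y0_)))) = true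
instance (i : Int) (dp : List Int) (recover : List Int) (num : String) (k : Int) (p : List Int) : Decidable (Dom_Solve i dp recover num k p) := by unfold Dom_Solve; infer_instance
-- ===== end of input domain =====

-- B re-implements the memoised top-down recursion as a bottom-up table filled back-to-front,
-- with per-divisor incremental remainders instead of growing big-integer segment values
-- (return value only: A mutates dp/recover in place, B does not).

-- ===== PORT A =====
-- int(num[j]) for one character (both Pythons parse single characters this way)
def pyDigit (cs : List Char) (j : Int) : Int :=
  (PySem.Int.ofChars? [PySem.List.pyGetD cs j '0']).getD 0

-- while i < k: if cur_num % p[i] == 0: return True; i += 1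
def isDivLoop (cur : Int) (k : Int) (p : List Int) (q : Int) : Bool :=
  if _h : q < k then
    if PySem.Int.mod cur (PySem.List.pyGetD p q 1) = 0 then true
    else isDivLoop cur k p (q + 1)
  else false
termination_by (k - q).toNat
decreasing_by omega

def IsDiv (cur : Int) (k : Int) (p : List Int) : Bool := isDivLoop cur k p 0

-- the recursion of A, with the dp/recover lists threaded through; fuel only makes the
-- mutual recursion structurally terminating (num.length + 1 levels always suffice)
mutual
def solveFuel (cs : List Char) (k : Int) (p : List Int) (fuel : Nat) (i : Int)
    (dp rcv : List Int) : Int × List Int × List Int :=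
  match fuel with
  | 0 => (0, dp, rcv)
  | fuel' + 1 =>
    if (cs.length : Int) ≤ i then (1, dp, rcv)
    else if PySem.List.pyGetD dp i (-1) ≠ -1 then (PySem.List.pyGetD dp i (-1), dp, rcv)
    else loopA cs k p fuel' i i 0 (PySem.List.pySetD dp i 0) rcv
termination_by (fuel, 0)

-- while j < len(num) and dp[i] == 0: …
def loopA (cs : List Char) (k : Int) (p : List Int) (fuel : Nat) (i j cur : Int)
    (dp rcv : List Int) : Int × List Int × List Int :=
  if _h : j < (cs.length : Int) ∧ PySem.List.pyGetD dp i 0 = 0 then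
    let cur' := 10 * cur + pyDigit cs j
    if IsDiv cur' k p then
      let r := solveFuel cs k p fuel (j + 1) dp rcv
      let rcv' := PySem.List.pySetD r.2.2 i (j + 1)
      let dp' := PySem.List.pySetD r.2.1 i r.1
      loopA cs k p fuel i (j + 1) cur' dp' rcv'
    else loopA cs k p fuel i (j + 1) cur' dp rcv
  else (PySem.List.pyGetD dp i 0, dp, rcv)
termination_by (fuel, ((cs.length : Int) - j).toNat + 1)
end

def Solve (i : Int) (dp : List Int) (recover : List Int) (num : String) (k : Int) (p : List Int) : Int :=
  (solveFuel num.toList k p (num.toList.length + 1) i dp recover).1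

-- ===== PORT B =====
-- rems = [(10*r + d) % q for r, q in zip(rems, pk)]
def updRems (rems pk : List Int) (d : Int) : List Int :=
  (rems.zip pk).map (fun rq => PySem.Int.mod (10 * rq.1 + d) rq.2)

-- for j in range(m, n): … with early break on a nonzero t[j+1]
def innerB (cs : List Char) (pk : List Int) (t : List Int) (j : Int) (rems : List Int) : Int :=
  if _h : j < (cs.length : Int) then
    let d := pyDigit cs j
    let rems' := updRems rems pk d
    if rems'.any (fun r => r = 0) then
      let v := PySem.List.pyGetD t (j + 1) 0
      if v ≠ 0 then v else innerB cs pk t (j + 1) rems'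
    else innerB cs pk t (j + 1) rems'
  else 0
termination_by ((cs.length : Int) - j).toNat
decreasing_by all_goals omega

-- for m in range(n-1, i-1, -1): …
def outerB (cs : List Char) (pk : List Int) (dp : List Int) (i : Int) (m : Int) (t : List Int) : List Int :=
  if _h : i ≤ m then
    let tm := if PySem.List.pyGetD dp m (-1) ≠ -1 then PySem.List.pyGetD dp m (-1)
              else innerB cs pk t m (List.replicate pk.length 0)
    outerB cs pk dp i (m - 1) (PySem.List.pySetD t m tm)
  else t
termination_by (m - i + 1).toNat
decreasing_by omega

def Solve_alt (i : Int) (dp : List Int) (recover : List Int) (num : String) (k : Int) (p : List Int) : Int :=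
  if (num.toList.length : Int) ≤ i then 1
  else if PySem.List.pyGetD dp i (-1) ≠ -1 then PySem.List.pyGetD dp i (-1)
  else
    let pk := PySem.List.slice p none (some k)
    let t0 := PySem.List.pySetD (List.replicate (num.toList.length + 1) 0) (num.toList.length : Int) 1
    PySem.List.pyGetD (outerB num.toList pk dp i ((num.toList.length : Int) - 1) t0) i 0

-- ===== PRECONDITION & SPEC =====
-- Pre_ admits every input on which A returns without entering the search (i past the string,
-- or a dp[i] lookup — possibly negative-index — that hits a memo value), and otherwise restricts
-- the search to its natural domain (0 ≤ i, digit-only num, dp/recover at least as long as num,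
-- 0 ≤ k ≤ len(p), no zero among p[:k]), since outside it A usually raises (ValueError/
-- IndexError/ZeroDivisionError) and the rare inputs where A still returns do so only because
-- an accident of its left-to-right search order stops it before the bad access.
def Pre_Solve (i : Int) (dp : List Int) (recover : List Int) (num : String) (k : Int) (p : List Int) : Prop :=
  ((num.toList.length : Int) ≤ i) ∨
  (i < (num.toList.length : Int) ∧ PySem.List.pyGetD dp i (-1) ≠ -1) ∨
  (0 ≤ i ∧ i < (num.toList.length : Int) ∧ num.toList.length ≤ dp.length ∧
    num.toList.length ≤ recover.length ∧ num.toList.all PySem.Chars.isdigit = true ∧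
    0 ≤ k ∧ k ≤ (p.length : Int) ∧ (p.take k.toNat).all (fun x => x ≠ 0) = true)
instance (i : Int) (dp : List Int) (recover : List Int) (num : String) (k : Int) (p : List Int) : Decidable (Pre_Solve i dp recover num k p) := by unfold Pre_Solve; infer_instance

def pvWitness_Solve : Int × List Int × List Int × String × Int × List Int :=
  (0, [-1, -1], [0, 0], "24", 1, [3])

def Spec_Solve (i : Int) (dp : List Int) (recover : List Int) (num : String) (k : Int) (p : List Int) (out : Int) : Prop := out = Solve_alt i dp recover num k p
instance (i : Int) (dp : List Int) (recover : List Int) (num : String) (k : Int) (p : List Int) (out : Int) : Decidable (Spec_Solve i dp recover num k p out) := by unfold Spec_Solve; infer_instance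

-- ===== CLAIM (what is proved, stated in full; the proofs are below) =====
def Claim_equal_Solve : Prop := ∀ (i : Int) (dp : List Int) (recover : List Int) (num : String) (k : Int) (p : List Int), Dom_Solve i dp recover num k p → Pre_Solve i dp recover num k p → Spec_Solve i dp recover num k p (Solve i dp recover num k p)

-- ===== LEMMAS AND PROOFS =====

theorem pyGetD_nn {α : Type} (xs : List α) (i : Int) (d : α) (h : 0 ≤ i) :
    PySem.List.pyGetD xs i d = xs.getD i.toNat d := by
  have h2 : i = ((i.toNat : Nat) : Int) := (Int.toNat_of_nonneg h).symm
  rw [h2, PySem.List.pyGetD_natCast]; simp [max_eq_left h]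

theorem getD_set_self (xs : List Int) (n : Nat) (v d : Int) (h : n < xs.length) :
    (xs.set n v).getD n d = v := by
  simp [List.getD_eq_getElem?_getD, h]

theorem getD_set_ne (xs : List Int) (n m : Nat) (v d : Int) (h : n ≠ m) :
    (xs.set n v).getD m d = xs.getD m d := by
  simp [List.getD_eq_getElem?_getD, List.getElem?_set_ne h]

theorem mod_zero_congr (a b q : Int) (h : q ∣ (a - b)) :
    (PySem.Int.mod a q = 0 ↔ PySem.Int.mod b q = 0) := by
  rw [PySem.Int.mod_eq_zero_iff_dvd, PySem.Int.mod_eq_zero_iff_dvd]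
  constructor <;> intro hd
  · have := dvd_sub hd h; simpa using this
  · have := dvd_add hd h; simpa using this

theorem mod_sub_self_dvd (x q : Int) : q ∣ (PySem.Int.mod x q - x) := by
  have h := PySem.Int.floordiv_mul_add_mod x q
  exact ⟨-(PySem.Int.floordiv x q), by linarith⟩

theorem isDivLoop_iff (cur : Int) (k : Int) (p : List Int) : ∀ q : Int,
    (isDivLoop cur k p q = true ↔
      ∃ r : Int, q ≤ r ∧ r < k ∧ PySem.Int.mod cur (PySem.List.pyGetD p r 1) = 0) := by
  intro q
  fun_induction isDivLoop cur k p q with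
  | case1 q hq hz => exact ⟨fun _ => ⟨q, le_refl _, hq, hz⟩, fun _ => rfl⟩
  | case2 q hq hz ih =>
    constructor
    · intro h; obtain ⟨r, h1, h2, h3⟩ := ih.mp h; exact ⟨r, by omega, h2, h3⟩
    · intro ⟨r, h1, h2, h3⟩
      have hrq : q + 1 ≤ r := by
        by_contra hc
        have hrq2 : r = q := by omega
        exact hz (hrq2 ▸ h3)
      exact ih.mpr ⟨r, hrq, h2, h3⟩
  | case3 q hq => simp; intro r h1 h2; omega

theorem updRems_spec (p : List Int) (k : Int) (hk0 : 0 ≤ k) (hkp : k ≤ (p.length : Int))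
    (rems : List Int) (d : Int) (hr : rems.length = k.toNat) :
    (updRems rems (p.take k.toNat) d).length = k.toNat ∧
    ∀ idx : Nat, idx < k.toNat →
      (updRems rems (p.take k.toNat) d).getD idx 0
        = PySem.Int.mod (10 * rems.getD idx 0 + d) (p.getD idx 1) := by
  have hkN : k.toNat ≤ p.length := by omega
  have hpk : (p.take k.toNat).length = k.toNat := by simp [List.length_take]; omega
  have hlen : (updRems rems (p.take k.toNat) d).length = k.toNat := by
    simp [updRems, List.length_zip, hr, hpk]
  refine ⟨hlen, ?_⟩
  intro idx hidx
  rw [List.getD_eq_getElem _ _ (by rw [hlen]; exact hidx)]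
  rw [List.getD_eq_getElem _ _ (by omega : idx < rems.length)]
  rw [List.getD_eq_getElem _ _ (by omega : idx < p.length)]
  simp only [updRems, List.getElem_map, List.getElem_zip]
  rw [List.getElem_take]

theorem any_eq_isDiv (p : List Int) (k : Int) (hk0 : 0 ≤ k) (hkp : k ≤ (p.length : Int))
    (rems : List Int) (hr : rems.length = k.toNat) (cur : Int)
    (hinv : ∀ idx : Nat, idx < k.toNat → (p.getD idx 1) ∣ (rems.getD idx 0 - cur)) (d : Int) :
    (∀ idx : Nat, idx < k.toNat →
      (p.getD idx 1) ∣ ((updRems rems (p.take k.toNat) d).getD idx 0 - (10 * cur + d))) ∧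
    ((updRems rems (p.take k.toNat) d).any (fun r => r = 0) = IsDiv (10 * cur + d) k p) := by
  obtain ⟨hlen, hget⟩ := updRems_spec p k hk0 hkp rems d hr
  have hX : ∀ idx : Nat, idx < k.toNat →
      (p.getD idx 1) ∣ ((10 * rems.getD idx 0 + d) - (10 * cur + d)) := by
    intro idx hidx
    have h4 := Dvd.dvd.mul_left (hinv idx hidx) 10
    have heq : 10 * rems.getD idx 0 + d - (10 * cur + d) = 10 * (rems.getD idx 0 - cur) := by ring
    rw [heq]; exact h4
  have hinv' : ∀ idx : Nat, idx < k.toNat →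
      (p.getD idx 1) ∣ ((updRems rems (p.take k.toNat) d).getD idx 0 - (10 * cur + d)) := by
    intro idx hidx
    rw [hget idx hidx]
    have h1 := mod_sub_self_dvd (10 * rems.getD idx 0 + d) (p.getD idx 1)
    have h5 := dvd_add h1 (hX idx hidx)
    have heq : (PySem.Int.mod (10 * rems.getD idx 0 + d) (p.getD idx 1)
          - (10 * rems.getD idx 0 + d)) + (10 * rems.getD idx 0 + d - (10 * cur + d))
        = PySem.Int.mod (10 * rems.getD idx 0 + d) (p.getD idx 1) - (10 * cur + d) := by ring
    rw [heq] at h5; exact h5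
  have hpoint : ∀ idx : Nat, idx < k.toNat →
      ((updRems rems (p.take k.toNat) d).getD idx 0 = 0 ↔
        PySem.Int.mod (10 * cur + d) (p.getD idx 1) = 0) := by
    intro idx hidx
    rw [hget idx hidx]
    exact mod_zero_congr _ _ _ (hX idx hidx)
  refine ⟨hinv', ?_⟩
  rw [Bool.eq_iff_iff]
  rw [List.any_eq_true]
  rw [show IsDiv (10 * cur + d) k p = isDivLoop (10 * cur + d) k p 0 from rfl]
  rw [isDivLoop_iff]
  constructor
  · intro ⟨x, hx, hx0⟩
    obtain ⟨idx, hidx, hxeq⟩ := List.mem_iff_getElem.mp hx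
    have hidx' : idx < k.toNat := by rw [hlen] at hidx; exact hidx
    refine ⟨(idx : Int), by omega, by omega, ?_⟩
    rw [pyGetD_nn _ _ _ (by omega)]
    simp only [Int.toNat_natCast]
    rw [← hpoint idx hidx']
    rw [List.getD_eq_getElem _ _ hidx, hxeq]
    simpa using hx0
  · intro ⟨r, hr0, hrk, hmod⟩
    have hidx' : r.toNat < k.toNat := by omega
    rw [pyGetD_nn _ _ _ hr0] at hmod
    have h7 := (hpoint r.toNat hidx').mpr hmod
    rw [List.getD_eq_getElem _ _ (by omega)] at h7
    exact ⟨_, List.getElem_mem _, by simpa using h7⟩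


-- the common specification: the pure value of A's memoised recursion, as a function of the
-- ORIGINAL dp contents dp0 (positions with dp0[m] ≠ -1 act as memo entries)
mutual
def Fm (cs : List Char) (k : Int) (p : List Int) (dp0 : List Int) (m : Nat) : Int :=
  if m < cs.length then
    if dp0.getD m (-1) ≠ -1 then dp0.getD m (-1)
    else Gm cs k p dp0 m 0
  else 1
termination_by (cs.length + 1 - m, 0)

def Gm (cs : List Char) (k : Int) (p : List Int) (dp0 : List Int) (j : Nat) (cur : Int) : Int :=
  if j < cs.length then
    let cur' := 10 * cur + pyDigit cs (j : Int)
    if IsDiv cur' k p then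
      if Fm cs k p dp0 (j + 1) ≠ 0 then Fm cs k p dp0 (j + 1)
      else Gm cs k p dp0 (j + 1) cur'
    else Gm cs k p dp0 (j + 1) cur'
  else 0
termination_by (cs.length - j, 1)
end

theorem getD_default_eq (xs : List Int) (m : Nat) (a b : Int) (h : m < xs.length) :
    xs.getD m a = xs.getD m b := by
  rw [List.getD_eq_getElem _ _ h, List.getD_eq_getElem _ _ h]

theorem solveFuel_succ (cs : List Char) (k : Int) (p : List Int) (fuel : Nat) (i : Int)
    (dp rcv : List Int) :
    solveFuel cs k p (fuel + 1) i dp rcv =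
      if (cs.length : Int) ≤ i then (1, dp, rcv)
      else if PySem.List.pyGetD dp i (-1) ≠ -1 then (PySem.List.pyGetD dp i (-1), dp, rcv)
      else loopA cs k p fuel i i 0 (PySem.List.pySetD dp i 0) rcv := by
  rw [solveFuel]

theorem loopA_exit (cs : List Char) (k : Int) (p : List Int) (fuel : Nat) (i j cur : Int)
    (dp rcv : List Int)
    (h : ¬ (j < (cs.length : Int) ∧ PySem.List.pyGetD dp i 0 = 0)) :
    loopA cs k p fuel i j cur dp rcv = (PySem.List.pyGetD dp i 0, dp, rcv) := by
  rw [loopA, dif_neg h]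

theorem loopA_step (cs : List Char) (k : Int) (p : List Int) (fuel : Nat) (i j cur : Int)
    (dp rcv : List Int)
    (h : j < (cs.length : Int) ∧ PySem.List.pyGetD dp i 0 = 0) :
    loopA cs k p fuel i j cur dp rcv =
      (if IsDiv (10 * cur + pyDigit cs j) k p then
        loopA cs k p fuel i (j + 1) (10 * cur + pyDigit cs j)
          (PySem.List.pySetD (solveFuel cs k p fuel (j + 1) dp rcv).2.1 i
            (solveFuel cs k p fuel (j + 1) dp rcv).1)
          (PySem.List.pySetD (solveFuel cs k p fuel (j + 1) dp rcv).2.2 i (j + 1))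
       else loopA cs k p fuel i (j + 1) (10 * cur + pyDigit cs j) dp rcv) := by
  rw [loopA, dif_pos h]

theorem Gm_exit (cs : List Char) (k : Int) (p : List Int) (dp0 : List Int) (j : Nat)
    (cur : Int) (h : ¬ j < cs.length) : Gm cs k p dp0 j cur = 0 := by
  rw [Gm, if_neg h]

theorem Gm_step (cs : List Char) (k : Int) (p : List Int) (dp0 : List Int) (j : Nat)
    (cur : Int) (h : j < cs.length) :
    Gm cs k p dp0 j cur =
      (if IsDiv (10 * cur + pyDigit cs (j : Int)) k p then
        if Fm cs k p dp0 (j + 1) ≠ 0 then Fm cs k p dp0 (j + 1)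
        else Gm cs k p dp0 (j + 1) (10 * cur + pyDigit cs (j : Int))
       else Gm cs k p dp0 (j + 1) (10 * cur + pyDigit cs (j : Int))) := by
  rw [Gm, if_pos h]

theorem loopA_eq (cs : List Char) (k : Int) (p : List Int) (dp0 : List Int)
    (hlen0 : cs.length ≤ dp0.length) (fuel : Nat)
    (IH : ∀ (i' : Int) (dp rcv : List Int), 0 ≤ i' →
      cs.length + 1 - i'.toNat ≤ fuel → 1 ≤ fuel →
      dp.length = dp0.length →
      (∀ m : Nat, i'.toNat ≤ m → m < cs.length →
        dp.getD m (-1) = dp0.getD m (-1) ∨ dp.getD m (-1) = Fm cs k p dp0 m) →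
      ∃ dp' rcv', solveFuel cs k p fuel i' dp rcv = (Fm cs k p dp0 i'.toNat, dp', rcv') ∧
        dp'.length = dp0.length ∧
        (∀ m : Nat, i'.toNat ≤ m → m < cs.length →
          dp'.getD m (-1) = dp0.getD m (-1) ∨ dp'.getD m (-1) = Fm cs k p dp0 m) ∧
        (∀ m : Nat, m < i'.toNat → dp'.getD m (-1) = dp.getD m (-1))) :
    ∀ (j i cur : Int) (dp rcv : List Int),
      0 ≤ i → i < (cs.length : Int) → i ≤ j →
      cs.length - j.toNat ≤ fuel → 1 ≤ fuel →
      dp.length = dp0.length →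
      dp.getD i.toNat (-1) = 0 →
      (∀ m : Nat, i.toNat < m → m < cs.length →
        dp.getD m (-1) = dp0.getD m (-1) ∨ dp.getD m (-1) = Fm cs k p dp0 m) →
      ∃ dp' rcv', loopA cs k p fuel i j cur dp rcv = (Gm cs k p dp0 j.toNat cur, dp', rcv') ∧
        dp'.length = dp0.length ∧
        dp'.getD i.toNat (-1) = Gm cs k p dp0 j.toNat cur ∧
        (∀ m : Nat, i.toNat < m → m < cs.length →
          dp'.getD m (-1) = dp0.getD m (-1) ∨ dp'.getD m (-1) = Fm cs k p dp0 m) ∧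
        (∀ m : Nat, m < i.toNat → dp'.getD m (-1) = dp.getD m (-1)) := by
  suffices H : ∀ N : Nat, ∀ (j i cur : Int) (dp rcv : List Int),
      cs.length ≤ N + j.toNat →
      0 ≤ i → i < (cs.length : Int) → i ≤ j →
      cs.length - j.toNat ≤ fuel → 1 ≤ fuel →
      dp.length = dp0.length →
      dp.getD i.toNat (-1) = 0 →
      (∀ m : Nat, i.toNat < m → m < cs.length →
        dp.getD m (-1) = dp0.getD m (-1) ∨ dp.getD m (-1) = Fm cs k p dp0 m) →
      ∃ dp' rcv', loopA cs k p fuel i j cur dp rcv = (Gm cs k p dp0 j.toNat cur, dp', rcv') ∧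
        dp'.length = dp0.length ∧
        dp'.getD i.toNat (-1) = Gm cs k p dp0 j.toNat cur ∧
        (∀ m : Nat, i.toNat < m → m < cs.length →
          dp'.getD m (-1) = dp0.getD m (-1) ∨ dp'.getD m (-1) = Fm cs k p dp0 m) ∧
        (∀ m : Nat, m < i.toNat → dp'.getD m (-1) = dp.getD m (-1)) by
    intro j i cur dp rcv h1 h2 h3 h4 h5 h6 h7 h8
    exact H cs.length j i cur dp rcv (by omega) h1 h2 h3 h4 h5 h6 h7 h8
  intro N
  induction N with
  | zero =>
    intro j i cur dp rcv hN hi0 hin hij hfj hf1 hl hdpi hgood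
    have hiN : i.toNat < cs.length := by omega
    have hjn : ¬ j < (cs.length : Int) := by omega
    rw [loopA_exit cs k p fuel i j cur dp rcv (by intro hc; exact hjn hc.1)]
    refine ⟨dp, rcv, ?_, hl, ?_, hgood, fun m _ => rfl⟩
    · rw [Gm_exit _ _ _ _ _ _ (by omega)]
      rw [pyGetD_nn _ _ _ hi0, getD_default_eq dp i.toNat 0 (-1) (by omega), hdpi]
    · rw [Gm_exit _ _ _ _ _ _ (by omega)]; exact hdpi
  | succ N ih =>
    intro j i cur dp rcv hN hi0 hin hij hfj hf1 hl hdpi hgood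
    have hiN : i.toNat < cs.length := by omega
    by_cases hjn : j < (cs.length : Int)
    · have hcond : j < (cs.length : Int) ∧ PySem.List.pyGetD dp i 0 = 0 := by
        refine ⟨hjn, ?_⟩
        rw [pyGetD_nn _ _ _ hi0, getD_default_eq dp i.toNat 0 (-1) (by omega), hdpi]
      rw [loopA_step cs k p fuel i j cur dp rcv hcond]
      have hj0 : 0 ≤ j := le_trans hi0 hij
      have hj1 : (j + 1).toNat = j.toNat + 1 := by omega
      have hjN : j.toNat < cs.length := by omega
      have hdig : pyDigit cs ((j.toNat : Nat) : Int) = pyDigit cs j := by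
        rw [Int.toNat_of_nonneg hj0]
      rw [Gm_step _ _ _ _ _ _ hjN, hdig]
      by_cases hdiv : IsDiv (10 * cur + pyDigit cs j) k p
      · rw [if_pos hdiv, if_pos hdiv]
        obtain ⟨dp1, rcv1, heq, hl1, hgood1, hunch1⟩ :=
          IH (j + 1) dp rcv (by omega) (by omega) (by omega) hl
            (fun m hm1 hm2 => hgood m (by omega) hm2)
        rw [heq, hj1]
        have hunch1i : ∀ m : Nat, m ≤ i.toNat → dp1.getD m (-1) = dp.getD m (-1) := by
          intro m hm; exact hunch1 m (by omega)
        -- the updated lists after the recursive call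
        have hrcv' : PySem.List.pySetD (Fm cs k p dp0 (j.toNat + 1), dp1, rcv1).2.2 i (j + 1)
            = PySem.List.pySetD rcv1 i (j + 1) := rfl
        have hdp' : PySem.List.pySetD (Fm cs k p dp0 (j.toNat + 1), dp1, rcv1).2.1 i
              (Fm cs k p dp0 (j.toNat + 1), dp1, rcv1).1
            = dp1.set i.toNat (Fm cs k p dp0 (j.toNat + 1)) := by
          rw [PySem.List.pySetD_of_nonneg _ _ hi0]
        rw [hrcv', hdp']
        set w := Fm cs k p dp0 (j.toNat + 1) with hw
        have hl2 : (dp1.set i.toNat w).length = dp0.length := by simpa using hl1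
        have hdp2i : (dp1.set i.toNat w).getD i.toNat (-1) = w :=
          getD_set_self dp1 i.toNat w (-1) (by omega)
        have hgood2 : ∀ m : Nat, i.toNat < m → m < cs.length →
            (dp1.set i.toNat w).getD m (-1) = dp0.getD m (-1) ∨
            (dp1.set i.toNat w).getD m (-1) = Fm cs k p dp0 m := by
          intro m hm1 hm2
          rw [getD_set_ne dp1 i.toNat m w (-1) (by omega)]
          by_cases hmj : m < (j + 1).toNat
          · rw [hunch1 m hmj]; exact hgood m hm1 hm2
          · exact hgood1 m (by omega) hm2
        have hunch2 : ∀ m : Nat, m < i.toNat →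
            (dp1.set i.toNat w).getD m (-1) = dp.getD m (-1) := by
          intro m hm
          rw [getD_set_ne dp1 i.toNat m w (-1) (by omega)]
          exact hunch1i m (by omega)
        by_cases hz : w ≠ 0
        · -- loop stops: dp[i] ≠ 0
          rw [if_pos hz]
          have hstop : ¬ (j + 1 < (cs.length : Int) ∧
              PySem.List.pyGetD (dp1.set i.toNat w) i 0 = 0) := by
            intro hc
            rw [pyGetD_nn _ _ _ hi0,
              getD_default_eq (dp1.set i.toNat w) i.toNat 0 (-1) (by simp; omega), hdp2i] at hc
            exact hz hc.2
          rw [loopA_exit _ _ _ _ _ _ _ _ _ hstop]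
          refine ⟨dp1.set i.toNat w, PySem.List.pySetD rcv1 i (j + 1), ?_, hl2, ?_, hgood2, hunch2⟩
          · rw [pyGetD_nn _ _ _ hi0,
              getD_default_eq (dp1.set i.toNat w) i.toNat 0 (-1) (by simp; omega), hdp2i]
          · exact hdp2i
        · -- rest == 0: the loop goes on
          rw [if_neg hz]
          rw [not_not] at hz
          obtain ⟨dp2, rcv2, heq2, hl3, hdp3i, hgood3, hunch3⟩ :=
            ih (j + 1) i (10 * cur + pyDigit cs j) (dp1.set i.toNat w)
              (PySem.List.pySetD rcv1 i (j + 1)) (by omega) hi0 hin (by omega) (by omega) hf1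
              hl2 (by rw [hdp2i, hz]) hgood2
          rw [hj1] at heq2 hdp3i
          refine ⟨dp2, rcv2, heq2, hl3, hdp3i, hgood3, ?_⟩
          intro m hm
          rw [hunch3 m hm]
          exact hunch2 m hm
      · rw [if_neg hdiv, if_neg hdiv]
        obtain ⟨dp2, rcv2, heq2, hl3, hdp3i, hgood3, hunch3⟩ :=
          ih (j + 1) i (10 * cur + pyDigit cs j) dp rcv (by omega) hi0 hin (by omega)
            (by omega) hf1 hl hdpi hgood
        rw [hj1] at heq2 hdp3i
        exact ⟨dp2, rcv2, heq2, hl3, hdp3i, hgood3, hunch3⟩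
    · have hstop : ¬ (j < (cs.length : Int) ∧ PySem.List.pyGetD dp i 0 = 0) := by
        intro hc; exact hjn hc.1
      rw [loopA_exit _ _ _ _ _ _ _ _ _ hstop]
      refine ⟨dp, rcv, ?_, hl, ?_, hgood, fun m _ => rfl⟩
      · rw [Gm_exit _ _ _ _ _ _ (by omega)]
        rw [pyGetD_nn _ _ _ hi0, getD_default_eq dp i.toNat 0 (-1) (by omega), hdpi]
      · rw [Gm_exit _ _ _ _ _ _ (by omega)]; exact hdpi

theorem solveFuel_eq (cs : List Char) (k : Int) (p : List Int) (dp0 : List Int)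
    (hlen0 : cs.length ≤ dp0.length) :
    ∀ (fuel : Nat) (i : Int) (dp rcv : List Int), 0 ≤ i →
    cs.length + 1 - i.toNat ≤ fuel → 1 ≤ fuel →
    dp.length = dp0.length →
    (∀ m : Nat, i.toNat ≤ m → m < cs.length →
      dp.getD m (-1) = dp0.getD m (-1) ∨ dp.getD m (-1) = Fm cs k p dp0 m) →
    ∃ dp' rcv', solveFuel cs k p fuel i dp rcv = (Fm cs k p dp0 i.toNat, dp', rcv') ∧
      dp'.length = dp0.length ∧
      (∀ m : Nat, i.toNat ≤ m → m < cs.length →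
        dp'.getD m (-1) = dp0.getD m (-1) ∨ dp'.getD m (-1) = Fm cs k p dp0 m) ∧
      (∀ m : Nat, m < i.toNat → dp'.getD m (-1) = dp.getD m (-1)) := by
  intro fuel
  induction fuel with
  | zero => intro i dp rcv _ _ hf1 _ _; omega
  | succ fuel ih =>
    intro i dp rcv hi0 hfuel hf1 hl hgood
    by_cases hin : (cs.length : Int) ≤ i
    · rw [solveFuel_succ, if_pos hin]
      refine ⟨dp, rcv, ?_, hl, hgood, fun m _ => rfl⟩
      rw [Fm, if_neg (by omega)]
    · have hiN : i.toNat < cs.length := by omega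
      by_cases hmemo : PySem.List.pyGetD dp i (-1) ≠ -1
      · rw [solveFuel_succ, if_neg hin, if_pos hmemo]
        rw [pyGetD_nn _ _ _ hi0] at hmemo ⊢
        refine ⟨dp, rcv, ?_, hl, hgood, fun m _ => rfl⟩
        rcases hgood i.toNat (le_refl _) hiN with hcase | hcase
        · rw [hcase]; rw [hcase] at hmemo
          rw [Fm, if_pos hiN, if_pos hmemo]
        · rw [hcase]
      · rw [solveFuel_succ, if_neg hin, if_neg hmemo]
        rw [not_not] at hmemo
        rw [pyGetD_nn _ _ _ hi0] at hmemo
        have hFG : Fm cs k p dp0 i.toNat = Gm cs k p dp0 i.toNat 0 := by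
          rcases hgood i.toNat (le_refl _) hiN with hcase | hcase
          · rw [hcase] at hmemo
            rw [Fm, if_pos hiN, if_neg (by rw [hmemo]; simp)]
          · by_cases hd0 : dp0.getD i.toNat (-1) ≠ -1
            · rw [hcase] at hmemo
              rw [Fm, if_pos hiN, if_pos hd0] at hmemo
              exact absurd hmemo hd0
            · rw [not_not] at hd0
              rw [Fm, if_pos hiN, if_neg (by rw [hd0]; simp)]
        have hset : PySem.List.pySetD dp i 0 = dp.set i.toNat 0 :=
          PySem.List.pySetD_of_nonneg _ _ hi0
        rw [hset]
        obtain ⟨dp', rcv', heq, hl', hdpi', hgood', hunch'⟩ :=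
          loopA_eq cs k p dp0 hlen0 fuel ih i i 0 (dp.set i.toNat 0) rcv hi0 (by omega)
            (le_refl _) (by omega) (by omega) (by simpa using hl)
            (getD_set_self dp i.toNat 0 (-1) (by omega))
            (fun m hm1 hm2 => by
              rw [getD_set_ne dp i.toNat m 0 (-1) (by omega)]
              exact hgood m (by omega) hm2)
        refine ⟨dp', rcv', ?_, hl', ?_, ?_⟩
        · rw [heq, hFG]
        · intro m hm1 hm2
          by_cases hmi : m = i.toNat
          · subst hmi; right; rw [hdpi', ← hFG]
          · exact hgood' m (by omega) hm2
        · intro m hm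
          rw [hunch' m hm]
          rw [getD_set_ne dp i.toNat m 0 (-1) (by omega)]

theorem Solve_eq_Fm (cs : List Char) (k : Int) (p : List Int) (dp : List Int)
    (hlen : cs.length ≤ dp.length) (i : Int) (hi : 0 ≤ i) (rcv : List Int) (num : String)
    (hnum : num.toList = cs) :
    Solve i dp rcv num k p = Fm cs k p dp i.toNat := by
  obtain ⟨dp', rcv', heq, _, _, _⟩ :=
    solveFuel_eq cs k p dp hlen (cs.length + 1) i dp rcv hi (by omega) (by omega) rfl
      (fun m _ _ => Or.inl rfl)
  rw [Solve, hnum, heq]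

theorem innerB_eq (cs : List Char) (k : Int) (p : List Int) (dp0 : List Int)
    (hk0 : 0 ≤ k) (hkp : k ≤ (p.length : Int)) (t : List Int) :
    ∀ (j : Int) (cur : Int) (rems : List Int), 0 ≤ j →
    (∀ x : Nat, j.toNat < x → x ≤ cs.length → t.getD x 0 = Fm cs k p dp0 x) →
    rems.length = k.toNat →
    (∀ idx : Nat, idx < k.toNat → (p.getD idx 1) ∣ (rems.getD idx 0 - cur)) →
    innerB cs (PySem.List.slice p none (some k)) t j rems = Gm cs k p dp0 j.toNat cur := by
  have hsl : PySem.List.slice p none (some k) = p.take k.toNat := PySem.List.slice_to p hk0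
  rw [hsl]
  suffices H : ∀ N : Nat, ∀ (j cur : Int) (rems : List Int), 0 ≤ j →
      (∀ x : Nat, j.toNat < x → x ≤ cs.length → t.getD x 0 = Fm cs k p dp0 x) →
      cs.length ≤ N + j.toNat → rems.length = k.toNat →
      (∀ idx : Nat, idx < k.toNat → (p.getD idx 1) ∣ (rems.getD idx 0 - cur)) →
      innerB cs (p.take k.toNat) t j rems = Gm cs k p dp0 j.toNat cur by
    intro j cur rems hj ht hr hinv
    exact H cs.length j cur rems hj ht (by omega) hr hinv
  intro N
  induction N with
  | zero =>
    intro j cur rems hj ht hN hr hinv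
    rw [innerB, dif_neg (by omega), Gm, if_neg (by omega)]
  | succ N ih =>
    intro j cur rems hj ht hN hr hinv
    by_cases hjn : j < (cs.length : Int)
    · rw [innerB, dif_pos hjn]
      have hjnat : j.toNat < cs.length := by omega
      have hj1 : (j + 1).toNat = j.toNat + 1 := by omega
      have hdig : pyDigit cs ((j.toNat : Nat) : Int) = pyDigit cs j := by
        rw [Int.toNat_of_nonneg hj]
      obtain ⟨hinv2, hany⟩ :=
        any_eq_isDiv p k hk0 hkp rems hr cur hinv (pyDigit cs j)
      rw [Gm, if_pos hjnat]
      simp only [hdig]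
      rw [hany]
      by_cases hdiv : IsDiv (10 * cur + pyDigit cs j) k p
      · rw [if_pos hdiv, if_pos hdiv]
        have hv : PySem.List.pyGetD t (j + 1) 0 = Fm cs k p dp0 (j.toNat + 1) := by
          rw [pyGetD_nn _ _ _ (by omega), hj1]
          exact ht (j.toNat + 1) (by omega) (by omega)
        rw [hv]
        by_cases hz : Fm cs k p dp0 (j.toNat + 1) ≠ 0
        · rw [if_pos hz, if_pos hz]
        · rw [if_neg hz, if_neg hz]
          have := ih (j + 1) (10 * cur + pyDigit cs j)
            (updRems rems (p.take k.toNat) (pyDigit cs j)) (by omega)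
            (fun x hx1 hx2 => ht x (by omega) hx2) (by omega)
            (updRems_spec p k hk0 hkp rems (pyDigit cs j) hr).1 hinv2
          rw [hj1] at this
          exact this
      · rw [if_neg hdiv, if_neg hdiv]
        have := ih (j + 1) (10 * cur + pyDigit cs j)
          (updRems rems (p.take k.toNat) (pyDigit cs j)) (by omega)
          (fun x hx1 hx2 => ht x (by omega) hx2) (by omega)
          (updRems_spec p k hk0 hkp rems (pyDigit cs j) hr).1 hinv2
        rw [hj1] at this
        exact this
    · rw [innerB, dif_neg hjn, Gm, if_neg (by omega)]

theorem outerB_eq (cs : List Char) (k : Int) (p : List Int) (dp0 : List Int)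
    (hk0 : 0 ≤ k) (hkp : k ≤ (p.length : Int)) (hlen0 : cs.length ≤ dp0.length) (i : Int)
    (hi : 0 ≤ i) :
    ∀ (m : Int) (t : List Int), m < (cs.length : Int) → i ≤ m + 1 →
    t.length = cs.length + 1 →
    (∀ x : Nat, (m : Int) < (x : Int) → x ≤ cs.length → t.getD x 0 = Fm cs k p dp0 x) →
    ∀ x : Nat, i ≤ (x : Int) → x ≤ cs.length →
      (outerB cs (PySem.List.slice p none (some k)) dp0 i m t).getD x 0 = Fm cs k p dp0 x := by
  have hkN : k.toNat ≤ p.length := by omega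
  have hpk : (PySem.List.slice p none (some k)).length = k.toNat := by
    rw [PySem.List.slice_to p hk0]; simp [List.length_take]; omega
  suffices H : ∀ N : Nat, ∀ (m : Int) (t : List Int), (m + 1 - i).toNat ≤ N →
      m < (cs.length : Int) → i ≤ m + 1 → t.length = cs.length + 1 →
      (∀ x : Nat, (m : Int) < (x : Int) → x ≤ cs.length → t.getD x 0 = Fm cs k p dp0 x) →
      ∀ x : Nat, i ≤ (x : Int) → x ≤ cs.length →
        (outerB cs (PySem.List.slice p none (some k)) dp0 i m t).getD x 0 = Fm cs k p dp0 x by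
    intro m t h1 h2 h3 h4
    exact H (m + 1 - i).toNat m t (le_refl _) h1 h2 h3 h4
  intro N
  induction N with
  | zero =>
    intro m t hN hm hi1 htl ht x hx1 hx2
    rw [outerB, dif_neg (by omega)]
    exact ht x (by omega) hx2
  | succ N ih =>
    intro m t hN hm hi1 htl ht x hx1 hx2
    by_cases him : i ≤ m
    · have hm0 : 0 ≤ m := le_trans hi him
      have hmn : m.toNat < cs.length := by omega
      rw [outerB, dif_pos him]
      show (outerB cs (PySem.List.slice p none (some k)) dp0 i (m - 1)
          (PySem.List.pySetD t m
            (if PySem.List.pyGetD dp0 m (-1) ≠ -1 then PySem.List.pyGetD dp0 m (-1)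
             else innerB cs (PySem.List.slice p none (some k)) t m
                    (List.replicate (PySem.List.slice p none (some k)).length 0)))).getD x 0
        = Fm cs k p dp0 x
      have hset : PySem.List.pySetD t m
            (if PySem.List.pyGetD dp0 m (-1) ≠ -1 then PySem.List.pyGetD dp0 m (-1)
             else innerB cs (PySem.List.slice p none (some k)) t m
                    (List.replicate (PySem.List.slice p none (some k)).length 0))
          = t.set m.toNat (Fm cs k p dp0 m.toNat) := by
        rw [PySem.List.pySetD_of_nonneg _ _ hm0]
        congr 1
        rw [pyGetD_nn _ _ _ hm0]
        by_cases hmemo : dp0.getD m.toNat (-1) ≠ -1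
        · rw [if_pos hmemo, Fm, if_pos hmn, if_pos hmemo]
        · rw [if_neg hmemo]
          have hrep : ∀ idx : Nat,
              (List.replicate (PySem.List.slice p none (some k)).length (0:Int)).getD idx 0
                = 0 := by
            intro idx
            by_cases hidx : idx < (PySem.List.slice p none (some k)).length
            · rw [List.getD_eq_getElem _ _ (by simpa using hidx)]; simp
            · rw [List.getD_eq_default _ _ (by simpa using Nat.le_of_not_lt hidx)]
          have := innerB_eq cs k p dp0 hk0 hkp t m 0
            (List.replicate (PySem.List.slice p none (some k)).length 0) hm0
            (fun x hx1 hx2 => ht x (by omega) hx2)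
            (by rw [List.length_replicate, hpk])
            (by intro idx hidx; rw [hrep idx]; simp)
          rw [PySem.List.slice_to p hk0] at this
          rw [PySem.List.slice_to p hk0, this, Fm, if_pos hmn, if_neg hmemo]
      rw [hset]
      have := ih (m - 1) (t.set m.toNat (Fm cs k p dp0 m.toNat)) (by omega) (by omega)
        (by omega) (by simpa using htl) ?_ x hx1 hx2
      · exact this
      · intro y hy1 hy2
        by_cases hym : y = m.toNat
        · subst hym
          exact getD_set_self t m.toNat _ 0 (by omega)
        · rw [getD_set_ne t m.toNat y _ 0 (Ne.symm hym)]
          exact ht y (by omega) hy2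
    · rw [outerB, dif_neg him]
      exact ht x (by omega) hx2

theorem Solve_alt_eq_Fm (cs : List Char) (k : Int) (p : List Int) (dp : List Int)
    (hlen : cs.length ≤ dp.length) (hk0 : 0 ≤ k) (hkp : k ≤ (p.length : Int))
    (i : Int) (hi : 0 ≤ i) (rcv : List Int) (num : String) (hnum : num.toList = cs) :
    Solve_alt i dp rcv num k p = Fm cs k p dp i.toNat := by
  rw [Solve_alt, hnum]
  by_cases hin : (cs.length : Int) ≤ i
  · rw [if_pos hin, Fm, if_neg (by omega)]
  · rw [if_neg hin]
    by_cases hmemo : PySem.List.pyGetD dp i (-1) ≠ -1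
    · rw [if_pos hmemo]
      rw [pyGetD_nn _ _ _ hi] at hmemo ⊢
      rw [Fm, if_pos (by omega), if_pos hmemo]
    · rw [if_neg hmemo]
      show PySem.List.pyGetD
          (outerB cs (PySem.List.slice p none (some k)) dp i ((cs.length : Int) - 1)
            (PySem.List.pySetD (List.replicate (cs.length + 1) 0) ((cs.length : Nat) : Int) 1))
          i 0 = Fm cs k p dp i.toNat
      have hset : PySem.List.pySetD (List.replicate (cs.length + 1) (0 : Int))
            ((cs.length : Nat) : Int) 1
          = (List.replicate (cs.length + 1) (0 : Int)).set cs.length 1 := by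
        rw [PySem.List.pySetD_of_nonneg _ _ (by omega)]
        simp
      rw [hset, pyGetD_nn _ _ _ hi]
      refine outerB_eq cs k p dp hk0 hkp hlen i hi ((cs.length : Int) - 1) _
        (by omega) (by omega) (by simp) ?_ i.toNat (by omega) (by omega)
      intro x hx1 hx2
      have hx : x = cs.length := by omega
      subst hx
      rw [getD_set_self _ _ _ _ (by simp), Fm, if_neg (by omega)]

-- ===== VERDICT (by name: the statement is the Claim_ definition above) =====
theorem Solve_spec : Claim_equal_Solve := by
  intro i dp recover num k p hDom hPre
  show Solve i dp recover num k p = Solve_alt i dp recover num k p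
  rcases hPre with h1 | ⟨hin, hmemo⟩ | ⟨hi0, hin, hdp, hrec, hdig, hk0, hkp, hpz⟩
  · rw [Solve, Solve_alt, solveFuel_succ, if_pos h1, if_pos h1]
  · rw [Solve, Solve_alt, solveFuel_succ, if_neg (by omega), if_pos hmemo,
      if_neg (by omega), if_pos hmemo]
  · rw [Solve_eq_Fm num.toList k p dp hdp i hi0 recover num rfl,
      Solve_alt_eq_Fm num.toList k p dp hdp hk0 hkp i hi0 recover num rfl]
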